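-- pv_equiv track=rewrite | github.com/paologir/progetti | rag/r-finetune/scripts/processors/dataset_processor.py | _contains_r_code
-- ===== SOURCE A (Python) =====
-- def _contains_r_code(text: str) -> bool:
--     """Check if text contains R code"""
--     r_indicators = [
--         'library(', 'require(', '<-', '%>%', 'data.frame',
--         'ggplot', 'geom_', 'mutate(', 'filter(', 'select(',
--         'summarise(', 'group_by(', 'read.csv', 'write.csv'
--     ]
--
--     text_lower = text.lower()
--     return any(indicator.lower() in text_lower for indicator in r_indicators)
-- ===== SOURCE B (Python) =====
-- _R_INDICATORS = [
--     'library(', 'require(', '<-', '%>%', 'data.frame',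
--     'ggplot', 'geom_', 'mutate(', 'filter(', 'select(',
--     'summarise(', 'group_by(', 'read.csv', 'write.csv'
-- ]
--
--
-- def _contains_r_code(text: str) -> bool:
--     # Single left-to-right pass over the text: at each position, test whether
--     # any indicator starts there, instead of one full substring scan per indicator.
--     tl = text.lower()
--     for i in range(len(tl)):
--         for ind in _R_INDICATORS:
--             if tl.startswith(ind, i):
--                 return True
--     return False
-- ===== Notes on version B (the rewrite author's own statement) =====
-- stated objective: alternative
-- what changed: Replaces A's per-indicator whole-text substring containment tests (one scan of the lowered text for each of 14 indicators) with a single positional left-to-right scan that at each index checks whether any indicator starts there.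
import Mathlib
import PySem

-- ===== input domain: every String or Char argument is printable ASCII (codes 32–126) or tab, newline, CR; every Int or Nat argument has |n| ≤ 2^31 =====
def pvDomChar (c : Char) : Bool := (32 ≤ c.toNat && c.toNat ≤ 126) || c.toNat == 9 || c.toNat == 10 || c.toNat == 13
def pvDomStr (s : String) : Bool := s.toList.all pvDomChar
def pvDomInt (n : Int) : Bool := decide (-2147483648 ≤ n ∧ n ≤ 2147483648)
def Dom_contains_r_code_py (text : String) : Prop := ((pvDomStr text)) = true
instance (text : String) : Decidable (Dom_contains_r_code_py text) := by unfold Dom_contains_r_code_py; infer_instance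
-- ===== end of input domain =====

-- B replaces A's per-indicator substring tests by a single positional scan of the text (alternative decomposition, same cost class).

-- the shared literal indicator list (identical in A and B)
def rIndicators : List String :=
  ["library(", "require(", "<-", "%>%", "data.frame",
   "ggplot", "geom_", "mutate(", "filter(", "select(",
   "summarise(", "group_by(", "read.csv", "write.csv"]

-- ===== PORT A =====
-- text_lower = text.lower(); any(indicator.lower() in text_lower for indicator in r_indicators)
def contains_r_code_py (text : String) : Bool :=
  let textLower := PySem.Str.lower text
  rIndicators.any (fun indicator => PySem.Str.isIn (PySem.Str.lower indicator) textLower)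

-- ===== PORT B =====
-- tl = text.lower(); for i in range(len(tl)): for ind in _R_INDICATORS: if tl.startswith(ind, i): return True; return False
-- (early-return nested loops = nested `any`; tl.startswith(ind, i) with 0 ≤ i is exactly `startswith (tl.drop i) ind` — exact)
def contains_r_code_py_alt (text : String) : Bool :=
  let tl := PySem.Chars.lower text.toList
  (List.range tl.length).any (fun i =>
    rIndicators.any (fun ind => PySem.Chars.startswith (tl.drop i) ind.toList))

-- ===== PRECONDITION & SPEC =====
def Spec_contains_r_code_py (text : String) (out : Bool) : Prop := out = contains_r_code_py_alt text
instance (text : String) (out : Bool) : Decidable (Spec_contains_r_code_py text out) := by unfold Spec_contains_r_code_py; infer_instance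

-- ===== CLAIM (what is proved, stated in full; the proofs are below) =====
def Claim_equal_contains_r_code_py : Prop := ∀ (text : String), Dom_contains_r_code_py text → Spec_contains_r_code_py text (contains_r_code_py text)

-- ===== LEMMAS AND PROOFS =====

-- every indicator is already lowercase and nonempty
theorem rIndicators_facts :
    ∀ ind ∈ rIndicators, PySem.Chars.lower ind.toList = ind.toList ∧ ind.toList ≠ [] := by
  decide

theorem any_congr_mem {α : Type} (l : List α) (f g : α → Bool)
    (h : ∀ x ∈ l, f x = g x) : l.any f = l.any g := by
  induction l with
  | nil => rfl
  | cons a t ih =>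
    rw [List.any_cons, List.any_cons, h a (by simp), ih (fun x hx => h x (by simp [hx]))]

theorem any_any_comm {α β : Type} (l : List α) (m : List β) (p : α → β → Bool) :
    l.any (fun a => m.any (fun b => p a b)) = m.any (fun b => l.any (fun a => p a b)) := by
  rw [Bool.eq_iff_iff]
  simp only [List.any_eq_true]
  constructor
  · rintro ⟨a, ha, b, hb, hp⟩; exact ⟨b, hb, a, ha, hp⟩
  · rintro ⟨b, hb, a, ha, hp⟩; exact ⟨a, ha, b, hb, hp⟩

-- the positional scan for a fixed nonempty pattern equals Python's `sub in s`
theorem scan_eq_isIn (sub s : List Char) (h : sub ≠ []) :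
    (List.range s.length).any (fun i => PySem.Chars.startswith (s.drop i) sub)
      = PySem.Chars.isIn sub s := by
  have hiff := PySem.Chars.exists_prefix_drop_iff_isIn sub s
  cases hIn : PySem.Chars.isIn sub s with
  | true =>
    obtain ⟨j, hj⟩ := hiff.mpr hIn
    have hjlt : j < s.length := by
      by_contra hge
      rw [List.drop_eq_nil_of_le (Nat.le_of_not_lt hge)] at hj
      exact h (List.prefix_nil.mp hj)
    simp only [List.any_eq_true, List.mem_range]
    exact ⟨j, hjlt, (PySem.Chars.startswith_iff _ _).mpr hj⟩
  | false =>
    rw [List.any_eq_false]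
    intro i _ hp
    rw [hiff.mp ⟨i, (PySem.Chars.startswith_iff _ _).mp hp⟩] at hIn
    simp at hIn

-- ===== VERDICT (by name: the statement is the Claim_ definition above) =====
theorem contains_r_code_py_spec : Claim_equal_contains_r_code_py := by
  intro text _
  show contains_r_code_py text = contains_r_code_py_alt text
  unfold contains_r_code_py contains_r_code_py_alt
  rw [any_any_comm]
  refine (any_congr_mem _ _ _ ?_).symm
  intro ind hind
  obtain ⟨hlow, hne⟩ := rIndicators_facts ind hind
  rw [scan_eq_isIn _ _ hne]
  simp [hlow]
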